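-- pv_equiv track=rewrite | github.com/LuisEduardoF/Codeforce | 327A.py | find_0subsequence
-- ===== SOURCE A (Python) =====
-- def find_0subsequence(board):
-- 	mSubsequence = 0
-- 	subsequence = 0
-- 	nOne = 0
-- 	for i in range(len(board)):
-- 		if(board[i] == 0):
-- 			subsequence += 1
-- 		else:
-- 			mSubsequence = max(subsequence, mSubsequence)
-- 			subsequence = 0
-- 			nOne += 1
-- 	mSubsequence = max(subsequence, mSubsequence)
-- 	if(mSubsequence > 0):
-- 		return mSubsequence + nOne
-- 	else:
-- 		return nOne - 1
-- ===== SOURCE B (Python) =====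
-- def find_0subsequence(board):
--     # positions of the non-zero entries; zero runs are the gaps between them
--     ones = [i for i, x in enumerate(board) if x != 0]
--     nOne = len(ones)
--     bounds = [-1] + ones + [len(board)]
--     maxZeroRun = max(b - a - 1 for a, b in zip(bounds, bounds[1:]))
--     return maxZeroRun + nOne if maxZeroRun > 0 else nOne - 1
-- ===== Notes on version B (the rewrite author's own statement) =====
-- stated objective: alternative
-- what changed: Instead of a fused loop maintaining current-run/max-run/count state, B records the indices of the non-zero entries in one comprehension and obtains the longest zero run as the largest gap between consecutive sentinelled non-zero positions.
import Mathlib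
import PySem

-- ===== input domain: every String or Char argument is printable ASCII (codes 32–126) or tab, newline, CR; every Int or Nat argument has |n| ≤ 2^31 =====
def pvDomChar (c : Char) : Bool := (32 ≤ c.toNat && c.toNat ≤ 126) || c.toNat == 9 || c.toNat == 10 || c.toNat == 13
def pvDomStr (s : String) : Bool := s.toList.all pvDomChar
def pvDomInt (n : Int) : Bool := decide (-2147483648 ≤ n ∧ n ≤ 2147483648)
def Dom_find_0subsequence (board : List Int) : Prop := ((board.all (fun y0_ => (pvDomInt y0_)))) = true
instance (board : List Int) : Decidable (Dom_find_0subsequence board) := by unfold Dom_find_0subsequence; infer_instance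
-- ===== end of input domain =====

-- B replaces A's fused state-machine loop by a gap computation over the recorded
-- positions of the non-zero entries (objective: alternative decomposition, same cost).

-- ===== PORT A =====
def find_0subsequence (board : List Int) : Int :=
  let st := (PySem.List.pyRange 0 board.length 1).foldl
    (fun (acc : Int × Int × Int) i =>
      if PySem.List.pyGetD board i 0 = 0 then (acc.1, acc.2.1 + 1, acc.2.2)
      else (max acc.2.1 acc.1, 0, acc.2.2 + 1))
    (0, 0, 0)
  let mSubsequence := max st.2.1 st.1
  if mSubsequence > 0 then mSubsequence + st.2.2 else st.2.2 - 1

-- ===== PORT B =====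
def find_0subsequence_alt (board : List Int) : Int :=
  let ones := ((PySem.List.enumerate board 0).filter (fun p => p.2 != 0)).map (fun p => p.1)
  let nOne : Int := ones.length
  let bounds := [-1] ++ ones ++ [(board.length : Int)]
  let maxZeroRun := (PySem.List.max? (List.zipWith (fun a b => b - a - 1) bounds bounds.tail) (fun y => y)).getD 0
  if maxZeroRun > 0 then maxZeroRun + nOne else nOne - 1

-- ===== PRECONDITION & SPEC =====
def Spec_find_0subsequence (board : List Int) (out : Int) : Prop := out = find_0subsequence_alt board
instance (board : List Int) (out : Int) : Decidable (Spec_find_0subsequence board out) := by unfold Spec_find_0subsequence; infer_instance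

-- ===== CLAIM (what is proved, stated in full; the proofs are below) =====
def Claim_equal_find_0subsequence : Prop := ∀ (board : List Int), Dom_find_0subsequence board → Spec_find_0subsequence board (find_0subsequence board)

-- ===== LEMMAS AND PROOFS =====

/-- Zero-run structure of a list: (length of leading zero run, lengths of the zero
runs after each successive non-zero element). -/
def pvRuns : List Int → Nat × List Nat
  | [] => (0, [])
  | x :: xs =>
    let p := pvRuns xs
    if x = 0 then (p.1 + 1, p.2) else (0, p.1 :: p.2)

def pvMaxT (l : List Nat) : Nat := l.foldr max 0

/-- number of non-zero entries -/
def pvCnt (xs : List Int) : Nat := xs.countP (fun x => x != 0)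

def pvStep (acc : Int × Int × Int) (x : Int) : Int × Int × Int :=
  if x = 0 then (acc.1, acc.2.1 + 1, acc.2.2)
  else (max acc.2.1 acc.1, 0, acc.2.2 + 1)

theorem pvA_fold (xs : List Int) : ∀ (m s n : Int), 0 ≤ s →
    (max (xs.foldl pvStep (m, s, n)).2.1 (xs.foldl pvStep (m, s, n)).1
      = max m (max (s + ((pvRuns xs).1 : Int)) ((pvMaxT (pvRuns xs).2 : Int)))
    ∧ (xs.foldl pvStep (m, s, n)).2.2 = n + (pvCnt xs : Int)) := by
  induction xs with
  | nil => intro m s n hs; simp [pvRuns, pvMaxT, pvCnt]; omega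
  | cons x xs ih =>
    intro m s n hs
    rw [List.foldl_cons]
    by_cases hx : x = 0
    · have hstep : pvStep (m, s, n) x = (m, s + 1, n) := by simp [pvStep, hx]
      have hr : pvRuns (x :: xs) = ((pvRuns xs).1 + 1, (pvRuns xs).2) := by
        simp [pvRuns, hx]
      have hc : pvCnt (x :: xs) = pvCnt xs := by simp [pvCnt, hx]
      rw [hstep, hr, hc]
      obtain ⟨h1, h2⟩ := ih m (s + 1) n (by omega)
      refine ⟨?_, h2⟩
      rw [h1]; push_cast; omega
    · have hstep : pvStep (m, s, n) x = (max s m, 0, n + 1) := by simp [pvStep, hx]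
      have hr : pvRuns (x :: xs) = (0, (pvRuns xs).1 :: (pvRuns xs).2) := by
        simp [pvRuns, hx]
      have hc : pvCnt (x :: xs) = pvCnt xs + 1 := by simp [pvCnt, hx]
      rw [hstep, hr, hc]
      obtain ⟨h1, h2⟩ := ih (max s m) 0 (n + 1) (by omega)
      have hm : pvMaxT ((pvRuns xs).1 :: (pvRuns xs).2) = max (pvRuns xs).1 (pvMaxT (pvRuns xs).2) := by
        simp [pvMaxT, List.foldr]
      refine ⟨?_, by rw [h2]; push_cast; omega⟩
      rw [h1, hm]; push_cast; omega

/-- A computed from the run structure. -/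
theorem pvA_char (board : List Int) :
    find_0subsequence board =
      (if (0:Int) < (max (pvRuns board).1 (pvMaxT (pvRuns board).2) : Nat) then
        ((max (pvRuns board).1 (pvMaxT (pvRuns board).2) : Nat) : Int) + (pvCnt board : Int)
      else (pvCnt board : Int) - 1) := by
  unfold find_0subsequence
  rw [show (fun (acc : Int × Int × Int) i =>
      if PySem.List.pyGetD board i 0 = 0 then (acc.1, acc.2.1 + 1, acc.2.2)
      else (max acc.2.1 acc.1, 0, acc.2.2 + 1))
    = (fun acc j => pvStep acc (PySem.List.pyGetD board j 0)) from rfl]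
  rw [PySem.List.foldl_pyRange_zero_pyGetD' board 0 pvStep (0, 0, 0)]
  obtain ⟨h1, h2⟩ := pvA_fold board 0 0 0 le_rfl
  show (if max (List.foldl pvStep (0, 0, 0) board).2.1 (List.foldl pvStep (0, 0, 0) board).1 > 0
      then max (List.foldl pvStep (0, 0, 0) board).2.1 (List.foldl pvStep (0, 0, 0) board).1
            + (List.foldl pvStep (0, 0, 0) board).2.2
      else (List.foldl pvStep (0, 0, 0) board).2.2 - 1) = _
  rw [h1, h2]
  split_ifs <;> push_cast at * <;> omega

/-- gaps of consecutive elements -/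
def pvGaps (l : List Int) : List Int := List.zipWith (fun a b => b - a - 1) l l.tail

def pvOnes (k : Int) (xs : List Int) : List Int :=
  ((PySem.List.enumerate xs k).filter (fun p => p.2 != 0)).map (fun p => p.1)

theorem pvOnes_len (k : Int) (xs : List Int) : (pvOnes k xs).length = pvCnt xs := by
  induction xs generalizing k with
  | nil => simp [pvOnes, pvCnt, PySem.List.enumerate_nil]
  | cons x xs ih =>
    simp only [pvOnes, pvCnt, PySem.List.enumerate_cons, List.filter_cons, List.countP_cons] at *
    by_cases hx : x = 0 <;> simp [hx, ih]

theorem pvGaps_eq (xs : List Int) : ∀ (k : Int),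
    pvGaps ((k - 1) :: (pvOnes k xs ++ [k + (xs.length : Int)]))
      = ((pvRuns xs).1 :: (pvRuns xs).2).map (fun n : Nat => (n : Int)) := by
  induction xs with
  | nil =>
    intro k
    simp only [pvOnes, PySem.List.enumerate_nil, List.filter_nil, List.map_nil,
      List.nil_append, pvRuns, pvGaps, List.tail_cons, List.zipWith, List.map_cons]
    norm_num
  | cons x xs ih =>
    intro k
    have hlen : k + ((x :: xs).length : Int) = (k + 1) + (xs.length : Int) := by
      push_cast [List.length_cons]; ring
    have h := ih (k + 1)
    rw [show (k + 1 - 1) = k from by ring] at h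
    by_cases hx : x = 0
    · have hones : pvOnes k (x :: xs) = pvOnes (k + 1) xs := by
        simp [pvOnes, PySem.List.enumerate_cons, hx]
      have hr : pvRuns (x :: xs) = ((pvRuns xs).1 + 1, (pvRuns xs).2) := by
        simp [pvRuns, hx]
      rw [hones, hlen, hr]
      cases hc : pvOnes (k + 1) xs ++ [(k + 1) + (xs.length : Int)] with
      | nil => simp at hc
      | cons b l =>
        rw [hc] at h
        simp only [pvGaps, List.tail_cons, List.zipWith, List.map_cons] at h ⊢
        rw [List.cons.injEq] at h
        refine List.cons_eq_cons.mpr ⟨?_, h.2⟩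
        push_cast
        omega
    · have hones : pvOnes k (x :: xs) = k :: pvOnes (k + 1) xs := by
        simp [pvOnes, PySem.List.enumerate_cons, hx]
      have hr : pvRuns (x :: xs) = (0, (pvRuns xs).1 :: (pvRuns xs).2) := by
        simp [pvRuns, hx]
      rw [hones, hlen, hr]
      simp only [pvGaps, List.cons_append, List.tail_cons, List.zipWith, List.map_cons] at h ⊢
      refine List.cons_eq_cons.mpr ⟨by push_cast; ring, h⟩

theorem pvMax_cast (t : List Nat) : ∀ (h : Nat),
    ((t.map (fun n : Nat => (n : Int))).foldl max (h : Int)) = ((max h (pvMaxT t) : Nat) : Int) := by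
  induction t with
  | nil => intro h; simp [pvMaxT]
  | cons a t ih =>
    intro h
    rw [List.map_cons, List.foldl_cons]
    rw [show max (h : Int) ((a : Nat) : Int) = ((max h a : Nat) : Int) from by push_cast; rfl]
    rw [ih (max h a)]
    have hm : pvMaxT (a :: t) = max a (pvMaxT t) := by simp [pvMaxT, List.foldr]
    rw [hm]
    congr 1
    omega

/-- B computed from the run structure. -/
theorem pvB_char (board : List Int) :
    find_0subsequence_alt board =
      (if (0:Int) < (max (pvRuns board).1 (pvMaxT (pvRuns board).2) : Nat) then
        ((max (pvRuns board).1 (pvMaxT (pvRuns board).2) : Nat) : Int) + (pvCnt board : Int)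
      else (pvCnt board : Int) - 1) := by
  have hg := pvGaps_eq board 0
  rw [show ((0:Int) - 1) = -1 from by ring,
      show ((0:Int) + (board.length : Int)) = (board.length : Int) from by ring] at hg
  unfold find_0subsequence_alt
  show (let ones := pvOnes 0 board
        let nOne : Int := ones.length
        let bounds := [-1] ++ ones ++ [(board.length : Int)]
        let maxZeroRun := (PySem.List.max? (List.zipWith (fun a b => b - a - 1) bounds bounds.tail) (fun y => y)).getD 0
        if maxZeroRun > 0 then maxZeroRun + nOne else nOne - 1) = _
  simp only
  simp only [List.cons_append, List.nil_append, List.tail_cons]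
  rw [show List.zipWith (fun a b => b - a - 1)
        ((-1) :: (pvOnes 0 board ++ [(board.length : Int)]))
        (pvOnes 0 board ++ [(board.length : Int)])
      = pvGaps ((-1) :: (pvOnes 0 board ++ [(board.length : Int)])) from rfl]
  rw [hg, List.map_cons, PySem.List.max?_id_cons, Option.getD_some]
  rw [pvMax_cast (pvRuns board).2 (pvRuns board).1]
  rw [pvOnes_len 0 board]

-- ===== VERDICT (by name: the statement is the Claim_ definition above) =====
theorem find_0subsequence_spec : Claim_equal_find_0subsequence := by
  intro board _
  unfold Spec_find_0subsequence
  rw [pvA_char, pvB_char]
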